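-- pv_equiv track=rewrite | github.com/adrianonciu/openwave-app | backend/app/services/story_summary_generator_service.py | _normalize_location_for_headline
-- ===== SOURCE A (Python) =====
-- def _normalize_location_for_headline(location_phrase: str | None) -> str | None:
--     if not location_phrase:
--         return None
--     location = location_phrase.strip()
--     for prefix in ("in ", "la ", "din ", "spre ", "pe "):
--         if location.lower().startswith(prefix):
--             return location[len(prefix):].strip()
--     return location
-- ===== SOURCE B (Python) =====
-- def _normalize_location_for_headline(location_phrase):
--     if not location_phrase:
--         return None
--     location = location_phrase.strip()
--     i = location.find(' ')
--     if i != -1 and location[:i].lower() in ("in", "la", "din", "spre", "pe"):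
--         return location[i + 1:].strip()
--     return location
-- ===== Notes on version B (the rewrite author's own statement) =====
-- stated objective: alternative
-- what changed: Instead of looping over five space-terminated prefixes and testing startswith on the lowered string for each, B splits at the first space once (str.find) and tests the lowered first word against the word tuple by a single membership check.
import Mathlib
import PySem

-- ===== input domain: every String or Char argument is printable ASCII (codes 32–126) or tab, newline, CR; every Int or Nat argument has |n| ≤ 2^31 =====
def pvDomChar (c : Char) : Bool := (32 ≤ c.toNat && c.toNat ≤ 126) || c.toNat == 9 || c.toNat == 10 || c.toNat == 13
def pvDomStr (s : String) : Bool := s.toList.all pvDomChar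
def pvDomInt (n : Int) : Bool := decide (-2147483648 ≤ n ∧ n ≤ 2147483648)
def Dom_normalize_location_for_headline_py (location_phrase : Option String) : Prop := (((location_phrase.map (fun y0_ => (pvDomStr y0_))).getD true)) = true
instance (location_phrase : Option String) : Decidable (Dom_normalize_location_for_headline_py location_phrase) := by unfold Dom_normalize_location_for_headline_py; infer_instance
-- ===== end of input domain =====

-- B replaces A's loop over five "word + space" prefixes (a startswith test per prefix on the
-- lowered string) by a single split at the first space and one membership test of the lowered
-- first word; same return value everywhere (objective: alternative).

-- ===== PORT A =====
-- the for-loop over the tuple of prefixes, first match wins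
def pvLoopA (location : String) : List String → Option String
  | [] => some location
  | p :: ps =>
      if PySem.Str.startswith (PySem.Str.lower location) p = true then
        some (PySem.Str.strip (PySem.Str.slice location (some (PySem.Str.len p)) none))
      else pvLoopA location ps

def normalize_location_for_headline_py (location_phrase : Option String) : Option String :=
  match location_phrase with
  | none => none
  | some s =>
      if s = "" then none
      else pvLoopA (PySem.Str.strip s) ["in ", "la ", "din ", "spre ", "pe "]

-- ===== PORT B =====
def normalize_location_for_headline_py_alt (location_phrase : Option String) : Option String :=
  match location_phrase with
  | none => none
  | some s =>
      if s = "" then none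
      else
        let location := PySem.Str.strip s
        let i := PySem.Str.find location " "
        if i ≠ -1 ∧ (["in", "la", "din", "spre", "pe"] : List String).contains
              (PySem.Str.lower (PySem.Str.slice location none (some i))) = true then
          some (PySem.Str.strip (PySem.Str.slice location (some (i + 1)) none))
        else some location

-- ===== PRECONDITION & SPEC =====
def Spec_normalize_location_for_headline_py (location_phrase : Option String) (out : Option String) : Prop := out = normalize_location_for_headline_py_alt location_phrase
instance (location_phrase : Option String) (out : Option String) : Decidable (Spec_normalize_location_for_headline_py location_phrase out) := by unfold Spec_normalize_location_for_headline_py; infer_instance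

-- ===== CLAIM (what is proved, stated in full; the proofs are below) =====
def Claim_equal_normalize_location_for_headline_py : Prop := ∀ (location_phrase : Option String), Dom_normalize_location_for_headline_py location_phrase → Spec_normalize_location_for_headline_py location_phrase (normalize_location_for_headline_py location_phrase)

-- ===== LEMMAS AND PROOFS =====

lemma pv_lowerChar_eq_space_iff (c : Char) : PySem.Chars.lowerChar c = ' ' ↔ c = ' ' := by
  unfold PySem.Chars.lowerChar PySem.Chars.isupper
  split
  · rename_i hc
    simp only [Bool.and_eq_true, decide_eq_true_eq] at hc
    constructor
    · intro h
      exfalso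
      have h1 : 65 ≤ c.toNat := hc.1
      have h2 : c.toNat ≤ 90 := hc.2
      have hv : (c.toNat + 32).isValidChar := by left; omega
      have ht : (Char.ofNat (c.toNat + 32)).toNat = c.toNat + 32 := by
        simp [Char.ofNat, Char.ofNatAux, hv]; omega
      have := congrArg Char.toNat h
      rw [ht] at this
      have h32 : (' ').toNat = 32 := rfl
      omega
    · intro h; subst h; simp at hc
  · simp

lemma pv_singleton_prefix_iff (c : Char) (xs : List Char) : [c] <+: xs ↔ xs[0]? = some c := by
  cases xs <;> simp [List.prefix_cons_iff, eq_comm]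

lemma pv_find_singleton_eq (L : List Char) (c : Char) (n : Nat) :
    PySem.Chars.find L [c] = (n : Int) ↔ L[n]? = some c ∧ ∀ i < n, L[i]? ≠ some c := by
  constructor
  · intro h
    have h0 : 0 ≤ PySem.Chars.find L [c] := by rw [h]; positivity
    obtain ⟨hp, hmin⟩ := PySem.Chars.find_spec h0
    rw [h] at hp hmin
    simp only [Int.toNat_natCast] at hp hmin
    rw [pv_singleton_prefix_iff, List.getElem?_drop, Nat.add_zero] at hp
    refine ⟨hp, fun i hi hc => ?_⟩
    exact hmin i hi (by rw [pv_singleton_prefix_iff, List.getElem?_drop, Nat.add_zero]; exact hc)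
  · rintro ⟨hn, hmin⟩
    have hinf : [c] <:+: L := by
      have hpre : [c] <+: L.drop n := by
        rw [pv_singleton_prefix_iff, List.getElem?_drop, Nat.add_zero]; exact hn
      exact hpre.isInfix.trans (L.drop_suffix n).isInfix
    have h0 : 0 ≤ PySem.Chars.find L [c] := (PySem.Chars.find_nonneg_iff L [c]).mpr hinf
    obtain ⟨hp, hminf⟩ := PySem.Chars.find_spec h0
    rw [pv_singleton_prefix_iff, List.getElem?_drop, Nat.add_zero] at hp
    set j := (PySem.Chars.find L [c]).toNat with hj
    have hjn : j = n := by
      by_contra hne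
      rcases Nat.lt_or_ge j n with hlt | hge
      · exact hmin j hlt hp
      · have : j ≠ n := hne
        have hnlt : n < j := by omega
        exact hminf n hnlt (by rw [pv_singleton_prefix_iff, List.getElem?_drop, Nat.add_zero]; exact hn)
    omega

lemma pv_prefix_word_space_iff (w L : List Char) (hw : ' ' ∉ w) :
    (w ++ [' ']) <+: PySem.Chars.lower L ↔
      (PySem.Chars.find L [' '] = (w.length : Int) ∧ PySem.Chars.lower (L.take w.length) = w) := by
  unfold PySem.Chars.lower
  set n := w.length with hn
  constructor
  · intro h
    have hlen : n + 1 ≤ L.length := by simpa using h.length_le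
    have heq : w ++ [' '] = (List.map PySem.Chars.lowerChar L).take (n + 1) := by
      simpa using List.prefix_iff_eq_take.mp h
    rw [← List.map_take] at heq
    have htake : List.map PySem.Chars.lowerChar (L.take n) = w := by
      calc List.map PySem.Chars.lowerChar (L.take n)
          = (List.map PySem.Chars.lowerChar (L.take (n + 1))).take n := by
            rw [← List.map_take, List.take_take]
            simp
        _ = (w ++ [' ']).take n := by rw [← heq]
        _ = w := List.take_left' hn.symm
    have hsp : L[n]? = some ' ' := by
      have h1 := congrArg (fun l => l[n]?) heq
      simp only [List.getElem?_append_right (Nat.le_of_eq hn.symm)] at h1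
      simp only [List.getElem?_map, List.getElem?_take_of_lt (Nat.lt_succ_self n)] at h1
      rw [← hn, Nat.sub_self] at h1
      simp only [List.getElem?_cons_zero] at h1
      obtain ⟨d, hd, hld⟩ := (Option.map_eq_some_iff).mp h1.symm
      rw [hd, (pv_lowerChar_eq_space_iff d).mp hld]
    refine ⟨(pv_find_singleton_eq L ' ' n).mpr ⟨hsp, fun i hi hc => ?_⟩, htake⟩
    have h1 := congrArg (fun l => l[i]?) heq
    simp only [List.getElem?_append_left (hn ▸ hi), List.getElem?_map,
      List.getElem?_take_of_lt (Nat.lt_succ_of_lt hi), hc] at h1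
    have h2 : w[i]? = some ' ' := by
      simpa [PySem.Chars.lowerChar, PySem.Chars.isupper] using h1
    exact hw (List.mem_of_getElem? h2)
  · rintro ⟨hf, htake⟩
    obtain ⟨hsp, -⟩ := (pv_find_singleton_eq L ' ' n).mp hf
    have hlt : n < L.length := by
      rcases Nat.lt_or_ge n L.length with h | h
      · exact h
      · rw [List.getElem?_eq_none_iff.mpr h] at hsp; cases hsp
    have hkey : (List.map PySem.Chars.lowerChar L).take (n + 1) = w ++ [' '] := by
      rw [← List.map_take, List.take_add_one, List.map_append, htake]
      congr 1
      simp [hsp, pv_lowerChar_eq_space_iff]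
    rw [← hkey]
    exact List.take_prefix _ _

lemma pv_B_of_match (location w p : String) (hw : ' ' ∉ w.toList) (hp : p.toList = w.toList ++ [' '])
    (h : PySem.Str.startswith (PySem.Str.lower location) p = true) :
    PySem.Str.find location " " = (w.toList.length : Int) ∧
      PySem.Str.lower (PySem.Str.slice location none (some (w.toList.length : Int))) = w := by
  rw [PySem.Str.startswith_eq, PySem.Chars.startswith_iff, PySem.Str.toList_lower, hp] at h
  obtain ⟨hf, ht⟩ := (pv_prefix_word_space_iff w.toList location.toList hw).mp h
  refine ⟨by rw [PySem.Str.find_eq]; exact hf, ?_⟩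
  apply String.toList_inj.mp
  rw [PySem.Str.toList_lower, PySem.Str.toList_slice, PySem.Chars.slice_eq_listSlice,
    PySem.List.slice_to_natCast]
  exact ht

lemma pv_match_of_B (location w p : String) (hw : ' ' ∉ w.toList) (hp : p.toList = w.toList ++ [' '])
    (hne : PySem.Str.find location " " ≠ -1)
    (hlow : PySem.Str.lower (PySem.Str.slice location none (some (PySem.Str.find location " "))) = w) :
    PySem.Str.startswith (PySem.Str.lower location) p = true ∧
      PySem.Str.find location " " = (w.toList.length : Int) := by
  rw [PySem.Str.find_eq, show (" ").toList = [' '] from rfl] at hne ⊢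
  have h0 : 0 ≤ PySem.Chars.find location.toList [' '] := by
    have := PySem.Chars.neg_one_le_find location.toList [' ']
    omega
  set n := (PySem.Chars.find location.toList [' ']).toNat with hnn
  have hfn : PySem.Chars.find location.toList [' '] = (n : Int) := (Int.toNat_of_nonneg h0).symm
  have hlow' : PySem.Chars.lower (location.toList.take n) = w.toList := by
    have := congrArg String.toList hlow
    rw [PySem.Str.toList_lower, PySem.Str.toList_slice, PySem.Chars.slice_eq_listSlice,
      PySem.Str.find_eq, show (" ").toList = [' '] from rfl, hfn,
      PySem.List.slice_to_natCast] at this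
    exact this
  obtain ⟨hsp, -⟩ := (pv_find_singleton_eq location.toList ' ' n).mp hfn
  have hlt : n < location.toList.length := by
    rcases Nat.lt_or_ge n location.toList.length with h | h
    · exact h
    · rw [List.getElem?_eq_none_iff.mpr h] at hsp; cases hsp
  have hlen : n = w.toList.length := by
    have := congrArg List.length hlow'
    simp only [PySem.Chars.lower, List.length_map, List.length_take] at this
    rw [Nat.min_eq_left hlt.le] at this
    exact this
  rw [hlen] at hfn hlow'
  refine ⟨?_, hfn⟩
  rw [PySem.Str.startswith_eq, PySem.Chars.startswith_iff, PySem.Str.toList_lower, hp]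
  exact (pv_prefix_word_space_iff w.toList location.toList hw).mpr ⟨hfn, hlow'⟩

lemma pv_core (location : String) :
    pvLoopA location ["in ", "la ", "din ", "spre ", "pe "] =
      (if PySem.Str.find location " " ≠ -1 ∧ (["in", "la", "din", "spre", "pe"] : List String).contains
            (PySem.Str.lower (PySem.Str.slice location none (some (PySem.Str.find location " ")))) = true then
         some (PySem.Str.strip (PySem.Str.slice location (some (PySem.Str.find location " " + 1)) none))
       else some location) := by
  simp only [pvLoopA]
  by_cases h1 : PySem.Str.startswith (PySem.Str.lower location) "in " = true
  · obtain ⟨hf, hl⟩ := pv_B_of_match location "in" "in " (by decide) rfl h1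
    rw [show (("in").toList.length : Int) = 2 from rfl] at hf hl
    rw [if_pos h1, hf, if_pos ⟨by norm_num, by rw [hl]; decide⟩]
    rw [show PySem.Str.len "in " = 3 from rfl, show (2:Int) + 1 = 3 from rfl]
  by_cases h2 : PySem.Str.startswith (PySem.Str.lower location) "la " = true
  · obtain ⟨hf, hl⟩ := pv_B_of_match location "la" "la " (by decide) rfl h2
    rw [show (("la").toList.length : Int) = 2 from rfl] at hf hl
    rw [if_neg h1, if_pos h2, hf, if_pos ⟨by norm_num, by rw [hl]; decide⟩]
    rw [show PySem.Str.len "la " = 3 from rfl, show (2:Int) + 1 = 3 from rfl]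
  by_cases h3 : PySem.Str.startswith (PySem.Str.lower location) "din " = true
  · obtain ⟨hf, hl⟩ := pv_B_of_match location "din" "din " (by decide) rfl h3
    rw [show (("din").toList.length : Int) = 3 from rfl] at hf hl
    rw [if_neg h1, if_neg h2, if_pos h3, hf, if_pos ⟨by norm_num, by rw [hl]; decide⟩]
    rw [show PySem.Str.len "din " = 4 from rfl, show (3:Int) + 1 = 4 from rfl]
  by_cases h4 : PySem.Str.startswith (PySem.Str.lower location) "spre " = true
  · obtain ⟨hf, hl⟩ := pv_B_of_match location "spre" "spre " (by decide) rfl h4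
    rw [show (("spre").toList.length : Int) = 4 from rfl] at hf hl
    rw [if_neg h1, if_neg h2, if_neg h3, if_pos h4, hf, if_pos ⟨by norm_num, by rw [hl]; decide⟩]
    rw [show PySem.Str.len "spre " = 5 from rfl, show (4:Int) + 1 = 5 from rfl]
  by_cases h5 : PySem.Str.startswith (PySem.Str.lower location) "pe " = true
  · obtain ⟨hf, hl⟩ := pv_B_of_match location "pe" "pe " (by decide) rfl h5
    rw [show (("pe").toList.length : Int) = 2 from rfl] at hf hl
    rw [if_neg h1, if_neg h2, if_neg h3, if_neg h4, if_pos h5, hf, if_pos ⟨by norm_num, by rw [hl]; decide⟩]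
    rw [show PySem.Str.len "pe " = 3 from rfl, show (2:Int) + 1 = 3 from rfl]
  · rw [if_neg h1, if_neg h2, if_neg h3, if_neg h4, if_neg h5, if_neg]
    rintro ⟨hne, hcon⟩
    simp only [List.contains_cons, List.contains_nil, Bool.or_eq_true, beq_iff_eq, Bool.or_false] at hcon
    rcases hcon with h | h | h | h | h
    · obtain ⟨hs, -⟩ := pv_match_of_B location "in" "in " (by decide) rfl hne h
      exact h1 hs
    · obtain ⟨hs, -⟩ := pv_match_of_B location "la" "la " (by decide) rfl hne h
      exact h2 hs
    · obtain ⟨hs, -⟩ := pv_match_of_B location "din" "din " (by decide) rfl hne h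
      exact h3 hs
    · obtain ⟨hs, -⟩ := pv_match_of_B location "spre" "spre " (by decide) rfl hne h
      exact h4 hs
    · obtain ⟨hs, -⟩ := pv_match_of_B location "pe" "pe " (by decide) rfl hne h
      exact h5 hs

-- ===== VERDICT (by name: the statement is the Claim_ definition above) =====
theorem normalize_location_for_headline_py_spec : Claim_equal_normalize_location_for_headline_py := by
  intro lp _
  unfold Spec_normalize_location_for_headline_py normalize_location_for_headline_py normalize_location_for_headline_py_alt
  match lp with
  | none => rfl
  | some s =>
      by_cases h : s = "" <;> simp [h, pv_core]
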